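-- pv_equiv track=rewrite | github.com/katehostetler/ryOS | scripts/fetch-changelogs.py | categorize_release
-- ===== SOURCE A (Python) =====
-- def categorize_release(title):
--     """Categorize a release based on its title."""
--     title_lower = title.lower()
--
--     if any(kw in title_lower for kw in ["major", "launch", "release", "new model", "introducing"]):
--         return "major"
--     elif any(kw in title_lower for kw in ["deprecat", "sunset", "removing", "end of"]):
--         return "deprecation"
--     elif any(kw in title_lower for kw in ["fix", "bug", "patch", "issue", "resolve"]):
--         return "fix"
--     else:
--         return "feature"
-- ===== SOURCE B (Python) =====
-- # B: single left-to-right scan over the title's positions, keeping the lowest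
-- # priority number of any keyword starting at the current position; the final
-- # priority is decoded to its category (alternative traversal: position-major
-- # instead of category-major).
--
-- _KEYWORD_PRIORITY = {
--     "major": 0, "launch": 0, "release": 0, "new model": 0, "introducing": 0,
--     "deprecat": 1, "sunset": 1, "removing": 1, "end of": 1,
--     "fix": 2, "bug": 2, "patch": 2, "issue": 2, "resolve": 2,
-- }
-- _CATEGORIES = ["major", "deprecation", "fix", "feature"]
--
--
-- def categorize_release(title):
--     t = title.lower()
--     best = 3
--     for i in range(len(t)):
--         for kw, p in _KEYWORD_PRIORITY.items():
--             if p < best and t.startswith(kw, i):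
--                 best = p
--     return _CATEGORIES[best]
-- ===== Notes on version B (the rewrite author's own statement) =====
-- stated objective: alternative
-- what changed: Replaces the category-major if/elif chain of substring tests with a position-major single scan: at each index of the lowercased title it records the best (lowest) priority of any keyword starting there, then decodes the final priority to a category.
import Mathlib
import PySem

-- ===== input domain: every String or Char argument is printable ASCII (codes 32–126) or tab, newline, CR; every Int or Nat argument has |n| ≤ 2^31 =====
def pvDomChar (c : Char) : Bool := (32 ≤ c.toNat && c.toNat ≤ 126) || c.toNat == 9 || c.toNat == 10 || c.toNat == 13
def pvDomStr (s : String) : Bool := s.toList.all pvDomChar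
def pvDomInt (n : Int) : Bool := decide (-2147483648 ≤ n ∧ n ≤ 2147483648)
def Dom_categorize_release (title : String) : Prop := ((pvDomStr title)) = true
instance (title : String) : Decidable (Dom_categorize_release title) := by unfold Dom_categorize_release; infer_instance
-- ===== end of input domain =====

-- B replaces A's category-major if/elif substring chain with a position-major single scan
-- that tracks the best (lowest) matching keyword priority (objective: alternative algorithm).


-- ===== PORT A =====
def categorize_release (title : String) : String :=
  let title_lower := PySem.Str.lower title
  if ["major", "launch", "release", "new model", "introducing"].any (fun kw => PySem.Str.isIn kw title_lower) then
    "major"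
  else if ["deprecat", "sunset", "removing", "end of"].any (fun kw => PySem.Str.isIn kw title_lower) then
    "deprecation"
  else if ["fix", "bug", "patch", "issue", "resolve"].any (fun kw => PySem.Str.isIn kw title_lower) then
    "fix"
  else
    "feature"

-- ===== PORT B =====
-- the dict _KEYWORD_PRIORITY as an association list in insertion order
def pvKwPrio : List (List Char × Nat) :=
  [("major".toList, 0), ("launch".toList, 0), ("release".toList, 0),
   ("new model".toList, 0), ("introducing".toList, 0),
   ("deprecat".toList, 1), ("sunset".toList, 1), ("removing".toList, 1),
   ("end of".toList, 1),
   ("fix".toList, 2), ("bug".toList, 2), ("patch".toList, 2),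
   ("issue".toList, 2), ("resolve".toList, 2)]

def pvCategories : List String := ["major", "deprecation", "fix", "feature"]

-- Source B's loop: best = 3; for i in range(len(t)): for kw, p in items:
--   if p < best and t.startswith(kw, i): best = p.
-- t.startswith(kw, i) for 0 ≤ i < len(t) is exact as: kw starts the suffix t.drop i.
def pvBestScan (t : List Char) : Nat :=
  (List.range t.length).foldl
    (fun best i => pvKwPrio.foldl
      (fun best kp =>
        if kp.2 < best ∧ PySem.Chars.startswith (List.drop i t) kp.1 then kp.2 else best)
      best) 3

-- _CATEGORIES[best]: 0 ≤ best ≤ 3 always holds, so the Python index never raises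
def categorize_release_alt (title : String) : String :=
  PySem.List.pyGetD pvCategories ((pvBestScan (PySem.Chars.lower title.toList) : Nat) : Int) "feature"

-- ===== PRECONDITION & SPEC =====
def Spec_categorize_release (title : String) (out : String) : Prop := out = categorize_release_alt title
instance (title : String) (out : String) : Decidable (Spec_categorize_release title out) := by unfold Spec_categorize_release; infer_instance

-- ===== CLAIM (what is proved, stated in full; the proofs are below) =====
def Claim_equal_categorize_release : Prop := ∀ (title : String), Dom_categorize_release title → Spec_categorize_release title (categorize_release title)

-- ===== LEMMAS AND PROOFS =====

-- every keyword in the table is a nonempty string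
theorem pv_kw_ne_nil : ∀ kp ∈ pvKwPrio, kp.1 ≠ [] := by
  intro kp h
  unfold pvKwPrio at h
  simp only [List.mem_cons, List.not_mem_nil, or_false] at h
  rcases h with rfl|rfl|rfl|rfl|rfl|rfl|rfl|rfl|rfl|rfl|rfl|rfl|rfl|rfl <;> simp

-- a monotone-guarded foldl ends ≤ k iff the accumulator already was, or some element forces it
theorem pv_foldl_mono_le {β : Type} (k : Nat) (P : β → Prop) (s : Nat → β → Nat)
    (hs : ∀ b x, s b x ≤ k ↔ b ≤ k ∨ P x) :
    ∀ (l : List β) (a : Nat), (l.foldl s a ≤ k ↔ a ≤ k ∨ ∃ x ∈ l, P x) := by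
  intro l
  induction l with
  | nil => intro a; simp
  | cons x xs ih =>
    intro a
    simp only [List.foldl_cons, ih (s a x), hs a x, List.mem_cons]
    constructor
    · rintro ((h | h) | ⟨i, hi, hP⟩)
      · exact Or.inl h
      · exact Or.inr ⟨x, Or.inl rfl, h⟩
      · exact Or.inr ⟨i, Or.inr hi, hP⟩
    · rintro (h | ⟨i, (rfl | hi), hP⟩)
      · exact Or.inl (Or.inl h)
      · exact Or.inl (Or.inr hP)
      · exact Or.inr ⟨i, hi, hP⟩

-- a nonempty keyword occurs at some scanned position iff it is a substring
theorem pv_exists_hit_iff (t kw : List Char) (hk : kw ≠ []) :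
    (∃ i ∈ List.range t.length, PySem.Chars.startswith (List.drop i t) kw = true) ↔
      PySem.Chars.isIn kw t = true := by
  rw [← PySem.Chars.exists_prefix_drop_iff_isIn]
  constructor
  · rintro ⟨i, _, h⟩
    exact ⟨i, (PySem.Chars.startswith_iff _ _).mp h⟩
  · rintro ⟨j, h⟩
    refine ⟨j, List.mem_range.mpr ?_, (PySem.Chars.startswith_iff _ _).mpr h⟩
    by_contra hj
    have hnil : List.drop j t = [] := List.drop_eq_nil_iff.mpr (by omega)
    rw [hnil] at h
    exact hk (List.prefix_nil.mp h)

-- the scan over an arbitrary keyword table: final priority ≤ k iff some keyword of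
-- priority ≤ k occurs in t (stated with the table abstract to keep unification cheap)
theorem pv_scan_le_iff (table : List (List Char × Nat)) (hne : ∀ kp ∈ table, kp.1 ≠ [])
    (t : List Char) (k : Nat) :
    ((List.range t.length).foldl
      (fun best i => table.foldl
        (fun best kp =>
          if kp.2 < best ∧ PySem.Chars.startswith (List.drop i t) kp.1 then kp.2 else best)
        best) 3 ≤ k) ↔
    (3 ≤ k ∨ ∃ kp ∈ table, kp.2 ≤ k ∧ PySem.Chars.isIn kp.1 t = true) := by
  have inner : ∀ (i : Nat) (b : Nat),
      table.foldl (fun best kp =>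
        if kp.2 < best ∧ PySem.Chars.startswith (List.drop i t) kp.1 then kp.2 else best) b ≤ k ↔
      b ≤ k ∨ ∃ kp ∈ table, kp.2 ≤ k ∧ PySem.Chars.startswith (List.drop i t) kp.1 = true := by
    intro i b
    refine pv_foldl_mono_le k
      (fun kp => kp.2 ≤ k ∧ PySem.Chars.startswith (List.drop i t) kp.1 = true)
      (fun best kp => if kp.2 < best ∧ PySem.Chars.startswith (List.drop i t) kp.1 then kp.2 else best)
      (fun m kp => ?_) table b
    dsimp only
    split_ifs with h
    · constructor
      · intro hle; exact Or.inr ⟨hle, h.2⟩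
      · rintro (hm | ⟨hle, _⟩) <;> omega
    · constructor
      · intro hm; exact Or.inl hm
      · rintro (hm | ⟨hle, hs⟩)
        · exact hm
        · rcases Nat.lt_or_ge kp.2 m with hlt | hge
          · exact absurd ⟨hlt, hs⟩ h
          · omega
  rw [pv_foldl_mono_le k
      (fun i => ∃ kp ∈ table, kp.2 ≤ k ∧ PySem.Chars.startswith (List.drop i t) kp.1 = true)
      (fun best i => table.foldl (fun best kp =>
        if kp.2 < best ∧ PySem.Chars.startswith (List.drop i t) kp.1 then kp.2 else best) best)
      (fun b i => inner i b) (List.range t.length) 3]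
  constructor
  · rintro (h3 | ⟨i, hi, kp, hkp, hle, hs⟩)
    · exact Or.inl h3
    · exact Or.inr ⟨kp, hkp, hle,
        (pv_exists_hit_iff t kp.1 (hne kp hkp)).mp ⟨i, hi, hs⟩⟩
  · rintro (h3 | ⟨kp, hkp, hle, hin⟩)
    · exact Or.inl h3
    · obtain ⟨i, hi, hs⟩ := (pv_exists_hit_iff t kp.1 (hne kp hkp)).mpr hin
      exact Or.inr ⟨i, hi, kp, hkp, hle, hs⟩

theorem pv_best_le_iff (t : List Char) (k : Nat) :
    pvBestScan t ≤ k ↔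
    (3 ≤ k ∨ ∃ kp ∈ pvKwPrio, kp.2 ≤ k ∧ PySem.Chars.isIn kp.1 t = true) := by
  unfold pvBestScan
  exact pv_scan_le_iff pvKwPrio pv_kw_ne_nil t k

theorem pv_best_le_zero (t : List Char) :
    pvBestScan t ≤ 0 ↔
      (PySem.Chars.isIn "major".toList t = true ∨
       PySem.Chars.isIn "launch".toList t = true ∨
       PySem.Chars.isIn "release".toList t = true ∨
       PySem.Chars.isIn "new model".toList t = true ∨
       PySem.Chars.isIn "introducing".toList t = true) := by
  rw [pv_best_le_iff]
  unfold pvKwPrio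
  simp only [List.mem_cons, List.not_mem_nil, or_false, exists_eq_or_imp, exists_eq_left]
  norm_num

theorem pv_best_le_one (t : List Char) :
    pvBestScan t ≤ 1 ↔
      (PySem.Chars.isIn "major".toList t = true ∨
       PySem.Chars.isIn "launch".toList t = true ∨
       PySem.Chars.isIn "release".toList t = true ∨
       PySem.Chars.isIn "new model".toList t = true ∨
       PySem.Chars.isIn "introducing".toList t = true ∨
       PySem.Chars.isIn "deprecat".toList t = true ∨
       PySem.Chars.isIn "sunset".toList t = true ∨
       PySem.Chars.isIn "removing".toList t = true ∨
       PySem.Chars.isIn "end of".toList t = true) := by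
  rw [pv_best_le_iff]
  unfold pvKwPrio
  simp only [List.mem_cons, List.not_mem_nil, or_false, exists_eq_or_imp, exists_eq_left]
  norm_num

theorem pv_best_le_two (t : List Char) :
    pvBestScan t ≤ 2 ↔
      (PySem.Chars.isIn "major".toList t = true ∨
       PySem.Chars.isIn "launch".toList t = true ∨
       PySem.Chars.isIn "release".toList t = true ∨
       PySem.Chars.isIn "new model".toList t = true ∨
       PySem.Chars.isIn "introducing".toList t = true ∨
       PySem.Chars.isIn "deprecat".toList t = true ∨
       PySem.Chars.isIn "sunset".toList t = true ∨
       PySem.Chars.isIn "removing".toList t = true ∨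
       PySem.Chars.isIn "end of".toList t = true ∨
       PySem.Chars.isIn "fix".toList t = true ∨
       PySem.Chars.isIn "bug".toList t = true ∨
       PySem.Chars.isIn "patch".toList t = true ∨
       PySem.Chars.isIn "issue".toList t = true ∨
       PySem.Chars.isIn "resolve".toList t = true) := by
  rw [pv_best_le_iff]
  unfold pvKwPrio
  simp only [List.mem_cons, List.not_mem_nil, or_false, exists_eq_or_imp, exists_eq_left]
  norm_num

theorem pv_best_le_three (t : List Char) : pvBestScan t ≤ 3 :=
  (pv_best_le_iff t 3).mpr (Or.inl le_rfl)

-- ===== VERDICT (by name: the statement is the Claim_ definition above) =====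
theorem categorize_release_spec : Claim_equal_categorize_release := by
  intro title _
  unfold Spec_categorize_release categorize_release categorize_release_alt
  simp only [PySem.Str.isIn_eq, PySem.Str.toList_lower]
  set t := PySem.Chars.lower title.toList with ht
  have h0 := pv_best_le_zero t
  have h1 := pv_best_le_one t
  have h2 := pv_best_le_two t
  have h3 := pv_best_le_three t
  simp only [List.any_cons, List.any_nil, Bool.or_false, Bool.or_eq_true]
  split_ifs with c0 c1 c2
  · have hb : pvBestScan t = 0 := by
      have := h0.mpr c0
      omega
    rw [hb]
    exact rfl
  · have hb : pvBestScan t = 1 := by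
      have hu : ¬ pvBestScan t ≤ 0 := fun hle => c0 (h0.mp hle)
      have hl : pvBestScan t ≤ 1 :=
        h1.mpr (Or.inr (Or.inr (Or.inr (Or.inr (Or.inr c1)))))
      omega
    rw [hb]
    exact rfl
  · have hb : pvBestScan t = 2 := by
      have hu : ¬ pvBestScan t ≤ 1 := fun hle => by
        rcases h1.mp hle with h|h|h|h|h|h
        exacts [c0 (Or.inl h), c0 (Or.inr (Or.inl h)), c0 (Or.inr (Or.inr (Or.inl h))),
          c0 (Or.inr (Or.inr (Or.inr (Or.inl h)))), c0 (Or.inr (Or.inr (Or.inr (Or.inr h)))),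
          c1 h]
      have hl : pvBestScan t ≤ 2 :=
        h2.mpr (Or.inr (Or.inr (Or.inr (Or.inr (Or.inr (Or.inr (Or.inr (Or.inr (Or.inr c2)))))))))
      omega
    rw [hb]
    exact rfl
  · have hb : pvBestScan t = 3 := by
      have hu : ¬ pvBestScan t ≤ 2 := fun hle => by
        rcases h2.mp hle with h|h|h|h|h|h|h|h|h|h
        exacts [c0 (Or.inl h), c0 (Or.inr (Or.inl h)), c0 (Or.inr (Or.inr (Or.inl h))),
          c0 (Or.inr (Or.inr (Or.inr (Or.inl h)))), c0 (Or.inr (Or.inr (Or.inr (Or.inr h)))),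
          c1 (Or.inl h), c1 (Or.inr (Or.inl h)), c1 (Or.inr (Or.inr (Or.inl h))),
          c1 (Or.inr (Or.inr (Or.inr h))), c2 h]
      omega
    rw [hb]
    exact rfl
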